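-- pv_equiv track=rewrite | github.com/phamngocson1408/parity_generator | Parity_generator/GenerateVerilog/GenerateDCLS.py | merge_gate_dict
-- ===== SOURCE A (Python) =====
-- def merge_gate_dict(gate_dict: dict, gate_dict_d1: dict):
--     merged_dict = {}
--
--     for key, value_list in gate_dict.items():
--         if key in merged_dict:
--             merged_dict[key].extend(value_list)
--         else:
--             merged_dict[key] = value_list[:]
--
--     for key, value_list in gate_dict_d1.items():
--         if key in merged_dict:
--             merged_dict[key].extend(value_list)
--         else:
--             merged_dict[key] = value_list[:]
--
--     return merged_dict
-- ===== SOURCE B (Python) =====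
-- def _merge(items, d1):
--     if not items:
--         return [(k, v[:]) for k, v in d1.items()]
--     k, v = items[0]
--     rest_d1 = {kk: vv for kk, vv in d1.items() if kk != k}
--     return [(k, v + d1.get(k, []))] + _merge(items[1:], rest_d1)
--
-- def merge_gate_dict(gate_dict: dict, gate_dict_d1: dict):
--     return dict(_merge(list(gate_dict.items()), dict(gate_dict_d1)))
-- ===== Notes on version B (the rewrite author's own statement) =====
-- stated objective: alternative
-- what changed: Replaced A's two sequential in-place passes over a mutable accumulator dict by a recursion on the first dict's items that emits each merged entry front-to-back and deletes the consumed key from the (shrinking) second dict, appending the untouched remainder of the second dict at the base case.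
import Mathlib
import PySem

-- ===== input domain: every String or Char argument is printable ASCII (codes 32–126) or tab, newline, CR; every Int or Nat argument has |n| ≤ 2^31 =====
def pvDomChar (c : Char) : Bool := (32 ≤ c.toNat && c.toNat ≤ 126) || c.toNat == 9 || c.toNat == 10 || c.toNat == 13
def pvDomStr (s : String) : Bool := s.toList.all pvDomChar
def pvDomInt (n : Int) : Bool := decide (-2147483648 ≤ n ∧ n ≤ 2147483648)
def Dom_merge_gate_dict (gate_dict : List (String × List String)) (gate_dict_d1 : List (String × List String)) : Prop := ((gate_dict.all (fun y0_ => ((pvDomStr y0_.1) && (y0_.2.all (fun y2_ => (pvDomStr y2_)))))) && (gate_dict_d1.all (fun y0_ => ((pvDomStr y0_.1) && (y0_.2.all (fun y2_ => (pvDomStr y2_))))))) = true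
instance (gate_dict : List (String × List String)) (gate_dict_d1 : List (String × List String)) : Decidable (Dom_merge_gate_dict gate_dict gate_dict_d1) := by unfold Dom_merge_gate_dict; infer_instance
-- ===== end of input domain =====

-- B replaces A's two in-place passes over a mutable accumulator by a recursion on the first
-- dict's items that emits each merged entry front-to-back and deletes the consumed key from
-- the shrinking second dict; same return value, proved equal.

-- ===== PORT A =====
-- the loop body shared by both of A's passes:
--   if key in merged: merged[key].extend(value_list)   (on the Dict model the in-place extend
--   is an overwrite of the entry, which keeps its position)  else: merged[key] = value_list[:]
def mergeStep (d : PySem.Dict String (List String)) (kv : String × List String) :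
    PySem.Dict String (List String) :=
  if d.contains kv.1 then d.insert kv.1 (d.getD kv.1 [] ++ kv.2) else d.insert kv.1 kv.2

def merge_gate_dict (gate_dict : List (String × List String)) (gate_dict_d1 : List (String × List String)) : List (String × List String) :=
  (gate_dict_d1.foldl mergeStep (gate_dict.foldl mergeStep PySem.Dict.empty)).items

-- ===== PORT B =====
-- _merge(items, d1): if not items: return [(k, v[:]) for k, v in d1.items()]
--   k, v = items[0]; rest_d1 = {kk: vv for kk, vv in d1.items() if kk != k}
--   return [(k, v + d1.get(k, []))] + _merge(items[1:], rest_d1)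
def mergeRec : List (String × List String) → List (String × List String) → List (String × List String)
  | [], d1 => d1.map (fun p => (p.1, p.2))
  | (k, v) :: rest, d1 =>
      (k, v ++ (PySem.Dict.mk d1).getD k []) :: mergeRec rest (d1.filter (fun p => p.1 ≠ k))

-- dict(_merge(list(gate_dict.items()), dict(gate_dict_d1)))  (the outer dict() is the identity
-- on the produced list, whose keys are distinct under Pre_)
def merge_gate_dict_alt (gate_dict : List (String × List String)) (gate_dict_d1 : List (String × List String)) : List (String × List String) :=
  mergeRec gate_dict gate_dict_d1

-- ===== PRECONDITION & SPEC =====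
-- Pre_ excludes association lists with a duplicated key inside one argument: such a list does
-- not represent a Python dict (dict construction collapses the duplicates before either
-- program runs), so no claim is made about it.
def Pre_merge_gate_dict (gate_dict : List (String × List String)) (gate_dict_d1 : List (String × List String)) : Prop :=
  (gate_dict.map Prod.fst).Nodup ∧ (gate_dict_d1.map Prod.fst).Nodup
instance (gate_dict : List (String × List String)) (gate_dict_d1 : List (String × List String)) : Decidable (Pre_merge_gate_dict gate_dict gate_dict_d1) := by unfold Pre_merge_gate_dict; infer_instance

def pvWitness_merge_gate_dict : (List (String × List String)) × (List (String × List String)) :=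
  ([("a", ["x"]), ("b", ["y", "z"])], [("b", ["w"]), ("c", [])])

def Spec_merge_gate_dict (gate_dict : List (String × List String)) (gate_dict_d1 : List (String × List String)) (out : List (String × List String)) : Prop := out = merge_gate_dict_alt gate_dict gate_dict_d1
instance (gate_dict : List (String × List String)) (gate_dict_d1 : List (String × List String)) (out : List (String × List String)) : Decidable (Spec_merge_gate_dict gate_dict gate_dict_d1 out) := by unfold Spec_merge_gate_dict; infer_instance

-- ===== CLAIM (what is proved, stated in full; the proofs are below) =====
def Claim_equal_merge_gate_dict : Prop := ∀ (gate_dict : List (String × List String)) (gate_dict_d1 : List (String × List String)), Dom_merge_gate_dict gate_dict gate_dict_d1 → Pre_merge_gate_dict gate_dict gate_dict_d1 → Spec_merge_gate_dict gate_dict gate_dict_d1 (merge_gate_dict gate_dict gate_dict_d1)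

-- ===== LEMMAS AND PROOFS =====

-- proof-side shorthand: the value list a literal dict holds at a key ([] when absent)
def gD (l : List (String × List String)) (k : String) : List String :=
  (PySem.Dict.mk l).getD k []

-- the common canonical value both programs compute
def Cform (gd gd1 : List (String × List String)) : List (String × List String) :=
  gd.map (fun p => (p.1, p.2 ++ gD gd1 p.1)) ++
    gd1.filter (fun q => !(gd.map Prod.fst).contains q.1)

lemma gD_nil (k : String) : gD [] k = [] := rfl

lemma gD_cons (k : String) (v : List String) (rest : List (String × List String)) (x : String) :
    gD ((k, v) :: rest) x = if k = x then v else gD rest x := by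
  simp [gD, PySem.Dict.getD_eq_get?_getD, PySem.Dict.get?_mk_cons]
  split_ifs <;> rfl

lemma gD_of_not_mem (l : List (String × List String)) (k : String)
    (h : k ∉ l.map Prod.fst) : gD l k = [] := by
  have : (PySem.Dict.mk l).get? k = none := by
    rw [PySem.Dict.get?_eq_none_iff_not_mem_keys]
    exact h
  simp [gD, PySem.Dict.getD_eq_get?_getD, this]

lemma gD_filter_ne (l : List (String × List String)) (k x : String) (hx : x ≠ k) :
    gD (l.filter (fun p => p.1 ≠ k)) x = gD l x := by
  induction l with
  | nil => rfl
  | cons p rest ih =>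
    obtain ⟨pk, pv⟩ := p
    by_cases hpk : pk = k
    · subst hpk
      rw [List.filter_cons_of_neg (by simp), ih, gD_cons, if_neg (Ne.symm hx)]
    · rw [List.filter_cons_of_pos (by simp [hpk]), gD_cons, gD_cons]
      split_ifs <;> [rfl; exact ih]

-- ===== A's side: the foldl over mergeStep produces the canonical form =====

lemma foldl_mergeStep_items (ys : List (String × List String))
    (d : PySem.Dict String (List String))
    (hd : d.keys.Nodup) (hy : (ys.map Prod.fst).Nodup) :
    (ys.foldl mergeStep d).items =
      d.items.map (fun p => (p.1, p.2 ++ gD ys p.1)) ++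
        ys.filter (fun q => !(d.contains q.1)) := by
  induction ys generalizing d with
  | nil => simp [gD_nil]
  | cons kv rest ih =>
    obtain ⟨k, v⟩ := kv
    simp only [List.map_cons, List.nodup_cons] at hy
    have hkrest : gD rest k = [] := gD_of_not_mem _ _ hy.1
    by_cases hk : d.contains k = true
    · have hnd' : (d.insert k (d.getD k [] ++ v)).keys.Nodup := by
        rw [PySem.Dict.keys_insert_of_contains _ _ hk]; exact hd
      have hfil : rest.filter (fun q => !(d.insert k (d.getD k [] ++ v)).contains q.1)
          = rest.filter (fun q => !d.contains q.1) := by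
        apply List.filter_congr
        intro q hq
        have hqk : q.1 ≠ k := fun h => hy.1 (h ▸ List.mem_map_of_mem hq)
        rw [PySem.Dict.contains_insert]
        simp [hqk]
      have hmap : d.items.map ((fun p => (p.1, p.2 ++ gD rest p.1)) ∘
            (fun p => if (p.1 == k) = true then (k, d.getD k [] ++ v) else p))
          = d.items.map (fun p => (p.1, p.2 ++ gD ((k, v) :: rest) p.1)) := by
        apply List.map_congr_left
        intro p hp
        by_cases hpk : p.1 = k
        · have hval : d.getD k [] = p.2 := by
            rw [← hpk]
            exact PySem.Dict.getD_of_mem_items d (by cases p; simpa using hp) hd []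
          simp [Function.comp, hpk, gD_cons, hkrest, hval]
        · simp [Function.comp, hpk, gD_cons, Ne.symm hpk]
      simp only [List.foldl_cons, mergeStep, hk, if_true]
      rw [ih _ hnd' hy.2, PySem.Dict.items_insert_of_contains _ _ hk, List.map_map,
        hmap, hfil]
      simp [hk]
    · rw [Bool.not_eq_true] at hk
      have hfil : rest.filter (fun q => !(d.insert k v).contains q.1)
          = rest.filter (fun q => !d.contains q.1) := by
        apply List.filter_congr
        intro q hq
        have hqk : q.1 ≠ k := fun h => hy.1 (h ▸ List.mem_map_of_mem hq)
        rw [PySem.Dict.contains_insert]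
        simp [hqk]
      have hmap : d.items.map (fun p => (p.1, p.2 ++ gD rest p.1))
          = d.items.map (fun p => (p.1, p.2 ++ gD ((k, v) :: rest) p.1)) := by
        apply List.map_congr_left
        intro p hp
        have hpk : p.1 ≠ k := by
          intro h
          have hmem : p.1 ∈ d.keys := PySem.Dict.mem_keys_of_mem_items d hp
          rw [h, PySem.Dict.contains_eq_decide_mem_keys] at *
          simp_all
        rw [gD_cons]
        simp [Ne.symm hpk]
      simp only [List.foldl_cons, mergeStep, hk, Bool.false_eq_true, if_false]
      rw [ih _ (PySem.Dict.nodup_keys_insert _ _ _ hd) hy.2,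
        PySem.Dict.items_insert_of_not_contains _ _ hk, List.map_append, hfil, hmap]
      simp [hk, gD_cons, hkrest, List.append_assoc]

-- A's first pass over fresh distinct keys just appends the pairs
lemma foldl_mergeStep_fresh (xs : List (String × List String))
    (d : PySem.Dict String (List String))
    (hnd : (xs.map Prod.fst).Nodup)
    (hfresh : ∀ kv ∈ xs, d.contains kv.1 = false) :
    (xs.foldl mergeStep d).items = d.items ++ xs := by
  induction xs generalizing d with
  | nil => simp
  | cons kv rest ih =>
    obtain ⟨k, v⟩ := kv
    simp only [List.map_cons, List.nodup_cons] at hnd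
    have hk : d.contains k = false := hfresh (k, v) (by simp)
    simp only [List.foldl_cons, mergeStep, hk, Bool.false_eq_true, if_false]
    rw [ih _ hnd.2 ?_, PySem.Dict.items_insert_of_not_contains _ _ hk, List.append_assoc]
    · rfl
    · intro q hq
      rw [PySem.Dict.contains_insert]
      have : q.1 ≠ k := fun h => hnd.1 (h ▸ List.mem_map_of_mem hq)
      simp [this, hfresh q (List.mem_cons_of_mem _ hq)]

lemma A_eq_Cform (gd gd1 : List (String × List String))
    (h1 : (gd.map Prod.fst).Nodup) (h2 : (gd1.map Prod.fst).Nodup) :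
    merge_gate_dict gd gd1 = Cform gd gd1 := by
  have hfresh : ∀ kv ∈ gd, (PySem.Dict.empty : PySem.Dict String (List String)).contains kv.1 = false := by
    intro kv _; simp [PySem.Dict.contains_empty]
  have h0 : (gd.foldl mergeStep PySem.Dict.empty).items = gd := by
    rw [foldl_mergeStep_fresh gd _ h1 hfresh]; rfl
  have hkeys0 : (gd.foldl mergeStep PySem.Dict.empty).keys = gd.map Prod.fst := by
    simp only [PySem.Dict.keys, h0]
  have hnd0 : (gd.foldl mergeStep PySem.Dict.empty).keys.Nodup := by rw [hkeys0]; exact h1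
  have hcont : ∀ k, (gd.foldl mergeStep PySem.Dict.empty).contains k = (gd.map Prod.fst).contains k := by
    intro k
    rw [PySem.Dict.contains_eq_decide_mem_keys, hkeys0]
    simp
  unfold merge_gate_dict Cform
  rw [foldl_mergeStep_items _ _ hnd0 h2, h0]
  congr 1
  exact List.filter_congr (fun q _ => by rw [hcont q.1])

-- ===== B's side: the recursion produces the canonical form =====

lemma B_eq_Cform (gd gd1 : List (String × List String))
    (h1 : (gd.map Prod.fst).Nodup) :
    mergeRec gd gd1 = Cform gd gd1 := by
  induction gd generalizing gd1 with
  | nil => simp [mergeRec, Cform]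
  | cons kv rest ih =>
    obtain ⟨k, v⟩ := kv
    simp only [List.map_cons, List.nodup_cons] at h1
    have hmap : rest.map (fun p => (p.1, p.2 ++ gD (gd1.filter (fun p => p.1 ≠ k)) p.1))
        = rest.map (fun p => (p.1, p.2 ++ gD gd1 p.1)) := by
      apply List.map_congr_left
      intro p hp
      have hpk : p.1 ≠ k := fun h => h1.1 (h ▸ List.mem_map_of_mem hp)
      rw [gD_filter_ne _ _ _ hpk]
    have hfil : (gd1.filter (fun p => p.1 ≠ k)).filter
          (fun q => !(rest.map Prod.fst).contains q.1)
        = gd1.filter (fun q => !(k :: rest.map Prod.fst).contains q.1) := by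
      rw [List.filter_filter]
      apply List.filter_congr
      intro q _
      by_cases hqk : q.1 = k
      · simp [hqk]
      · simp [hqk, Ne.symm hqk]
    simp only [mergeRec, Cform, List.map_cons]
    rw [ih _ h1.2]
    unfold Cform
    rw [hmap, hfil]
    rfl

-- ===== VERDICT (by name: the statement is the Claim_ definition above) =====
theorem merge_gate_dict_spec : Claim_equal_merge_gate_dict := by
  intro gd gd1 _ hpre
  unfold Spec_merge_gate_dict merge_gate_dict_alt
  rw [A_eq_Cform gd gd1 hpre.1 hpre.2, B_eq_Cform gd gd1 hpre.1]
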